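-- pv_equiv track=rewrite | github.com/EmmaBin/DSA | closest_enemy.py | ClosestEnemy
-- ===== SOURCE A (Python) =====
-- def ClosestEnemy(arr):
--   #case1, no 2
--   if 2 not in arr:
--     return 0
--   #case2, 1 is on the left side of 2
--   if arr.index(1) < arr.index(2):
--     return arr.index(2) - arr.index(1)
--   #case3, 2 is on the left side
--   i_position = arr.index(1)
--
--   for j in range(i_position, -1, -1):
--
--     if arr[j]==2:
--
--       return i_position-j
-- ===== SOURCE B (Python) =====
-- def ClosestEnemy(arr):
--   # one pass: first index of 1, last 2 before it, first 2 after it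
--   p1 = left2 = right2 = None
--   for i, v in enumerate(arr):
--     if v == 1 and p1 is None:
--       p1 = i
--     elif v == 2:
--       if p1 is None:
--         left2 = i
--       elif right2 is None:
--         right2 = i
--   if left2 is None and right2 is None:
--     return 0
--   if left2 is not None:
--     return p1 - left2
--   return right2 - p1
-- ===== Notes on version B (the rewrite author's own statement) =====
-- stated objective: alternative
-- what changed: B makes a single enumerate pass recording the first 1, the last 2 before it and the first 2 after it, replacing A's repeated arr.index calls plus a separate backward scan; it trades A's several C-level built-in scans for one explicit pass.
import Mathlib
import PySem

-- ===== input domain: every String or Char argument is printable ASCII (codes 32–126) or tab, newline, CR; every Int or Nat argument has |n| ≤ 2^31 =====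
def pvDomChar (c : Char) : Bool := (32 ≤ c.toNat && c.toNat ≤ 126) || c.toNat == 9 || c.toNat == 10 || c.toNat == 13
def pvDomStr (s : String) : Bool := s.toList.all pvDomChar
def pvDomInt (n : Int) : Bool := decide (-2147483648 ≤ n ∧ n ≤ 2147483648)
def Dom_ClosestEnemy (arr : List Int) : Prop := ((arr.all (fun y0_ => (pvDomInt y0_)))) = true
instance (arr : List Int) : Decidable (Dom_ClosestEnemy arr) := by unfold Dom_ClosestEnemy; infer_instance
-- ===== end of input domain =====

-- B replaces A's repeated arr.index scans plus backward loop by ONE enumerate pass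
-- (first 1, last 2 before it, first 2 after it); return value only (no mutation in either).

-- ===== PORT A =====
-- the backward 'for j in range(i_position, -1, -1)' loop; [] = loop falls off the end
-- (Python returns None; unreachable under Pre_, since a 2 exists at an index ≤ p1), ported as 0
def aScan (arr : List Int) (p1 : Int) : List Int → Int
  | [] => 0
  | j :: rest => if PySem.List.pyGetD arr j 0 == 2 then p1 - j else aScan arr p1 rest

def ClosestEnemy (arr : List Int) : Int :=
  if ¬ (2 ∈ arr) then 0
  else
    match PySem.List.index? arr 1, PySem.List.index? arr 2 with
    | some p1, some p2 =>
        if p1 < p2 then (p2 : Int) - (p1 : Int)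
        else aScan arr (p1 : Int) (PySem.List.pyRange (p1 : Int) (-1) (-1))
    | _, _ => 0  -- arr.index(1) raises ValueError in Python: excluded by Pre_

-- ===== PORT B =====
-- Source B's loop, state (p1, left2, right2) over the enumerate pass
def bLoop : Option Int → Option Int → Option Int → List (Int × Int) → Option Int × Option Int × Option Int
  | p1, l, r, [] => (p1, l, r)
  | p1, l, r, (i, v) :: rest =>
      if v == 1 && p1.isNone then bLoop (some i) l r rest
      else if v == 2 then
        if p1.isNone then bLoop p1 (some i) r rest
        else if r.isNone then bLoop p1 l (some i) rest
        else bLoop p1 l r rest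
      else bLoop p1 l r rest

def ClosestEnemy_alt (arr : List Int) : Int :=
  match bLoop none none none (PySem.List.enumerate arr) with
  | (_, none, none) => 0
  | (p1, some l, _) => p1.getD 0 - l   -- p1 = none here is Python's TypeError: excluded by Pre_
  | (p1, none, some r) => r - p1.getD 0

-- ===== PRECONDITION & SPEC =====
-- Pre_ excludes exactly the inputs containing a 2 but no 1, on which A raises ValueError
-- (arr.index(1)) and B raises TypeError (None arithmetic); neither returns a value there.
def Pre_ClosestEnemy (arr : List Int) : Prop := 2 ∈ arr → 1 ∈ arr
instance (arr : List Int) : Decidable (Pre_ClosestEnemy arr) := by unfold Pre_ClosestEnemy; infer_instance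
def pvWitness_ClosestEnemy : List Int := [0, 2, 0, 1, 2]

def Spec_ClosestEnemy (arr : List Int) (out : Int) : Prop := out = ClosestEnemy_alt arr
instance (arr : List Int) (out : Int) : Decidable (Spec_ClosestEnemy arr out) := by unfold Spec_ClosestEnemy; infer_instance

-- ===== CLAIM (what is proved, stated in full; the proofs are below) =====
def Claim_equal_ClosestEnemy : Prop := ∀ (arr : List Int), Dom_ClosestEnemy arr → Pre_ClosestEnemy arr → Spec_ClosestEnemy arr (ClosestEnemy arr)

-- ===== LEMMAS AND PROOFS =====

-- proof-only bookkeeping: index of the last 2 (with accumulator) / first 2 of a list, offset s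
def lastTwo : List Int → Int → Option Int → Option Int
  | [], _, acc => acc
  | v :: t, s, acc => lastTwo t (s + 1) (if v = 2 then some s else acc)

def firstTwo : List Int → Int → Option Int
  | [], _ => none
  | v :: t, s => if v = 2 then some s else firstTwo t (s + 1)

lemma enumerate_append (xs ys : List Int) (s : Int) :
    PySem.List.enumerate (xs ++ ys) s
      = PySem.List.enumerate xs s ++ PySem.List.enumerate ys (s + xs.length) := by
  induction xs generalizing s with
  | nil => simp [PySem.List.enumerate_nil]
  | cons x t ih =>
    have h : s + 1 + (t.length : Int) = s + ((t.length : Int) + 1) := by ring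
    simp [PySem.List.enumerate_cons, ih, h]

lemma lastTwo_append (t : List Int) (v : Int) (s : Int) (acc : Option Int) :
    lastTwo (t ++ [v]) s acc = if v = 2 then some (s + t.length) else lastTwo t s acc := by
  induction t generalizing s acc with
  | nil => simp [lastTwo]
  | cons x t ih =>
    by_cases hv : v = 2
    · simp only [List.cons_append, lastTwo, ih, if_pos hv, List.length_cons]
      congr 1
      push_cast
      ring
    · simp only [List.cons_append, lastTwo, ih, if_neg hv]

lemma lastTwo_of_not_mem (q : List Int) (s : Int) (acc : Option Int) (h : 2 ∉ q) :
    lastTwo q s acc = acc := by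
  induction q generalizing s acc with
  | nil => simp [lastTwo]
  | cons x t ih =>
    have hx : x ≠ 2 := fun e => h (e ▸ List.mem_cons_self)
    simp only [lastTwo, if_neg hx]
    exact ih _ _ (fun m => h (List.mem_cons_of_mem _ m))

lemma lastTwo_isSome_acc (q : List Int) (s a : Int) : (lastTwo q s (some a)).isSome := by
  induction q generalizing s a with
  | nil => simp [lastTwo]
  | cons x t ih => by_cases hx : x = 2 <;> simp [lastTwo, hx, ih]

lemma lastTwo_isSome_of_mem (q : List Int) (s : Int) (acc : Option Int) (h : 2 ∈ q) :
    (lastTwo q s acc).isSome := by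
  induction q generalizing s acc with
  | nil => simp at h
  | cons x t ih =>
    by_cases hx : x = 2
    · simp only [lastTwo, if_pos hx]
      exact lastTwo_isSome_acc t (s + 1) s
    · have ht : 2 ∈ t := by
        rcases List.mem_cons.mp h with h' | h'
        · exact absurd h'.symm hx
        · exact h'
      simp only [lastTwo, if_neg hx]
      exact ih _ _ ht

lemma firstTwo_eq (q : List Int) (s : Int) :
    firstTwo q s = (PySem.List.index? q 2).map (fun k => s + (k : Int)) := by
  induction q generalizing s with
  | nil => simp [firstTwo]
  | cons v t ih =>
    by_cases hv : v = 2
    · subst hv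
      simp [firstTwo, List.idxOf?_cons]
    · rw [PySem.List.index?_cons_of_ne t hv]
      simp only [firstTwo, if_neg hv, ih (s + 1)]
      cases PySem.List.index? t 2 with
      | none => simp
      | some m =>
        have he : s + 1 + (m : Int) = s + ((m : Int) + 1) := by ring
        simp [he]

lemma index?_append_not_mem (v : Int) (pre suf : List Int) (h : v ∉ pre) :
    PySem.List.index? (pre ++ suf) v = (PySem.List.index? suf v).map (· + pre.length) := by
  induction pre with
  | nil =>
    rw [List.nil_append]
    cases PySem.List.index? suf v <;> simp
  | cons x t ih =>
    have hx : x ≠ v := fun e => h (e ▸ List.mem_cons_self)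
    have ht : v ∉ t := fun m => h (List.mem_cons_of_mem _ m)
    rw [List.cons_append, PySem.List.index?_cons_of_ne (t ++ suf) hx, ih ht]
    cases PySem.List.index? suf v with
    | none => simp
    | some m => rfl

lemma bLoop_phase1 (q : List Int) (s : Int) (l r : Option Int) (rest : List (Int × Int)) :
    1 ∉ q → bLoop none l r (PySem.List.enumerate q s ++ rest) = bLoop none (lastTwo q s l) r rest := by
  induction q generalizing s l with
  | nil => intro _; simp [PySem.List.enumerate_nil, lastTwo]
  | cons v t ih =>
    intro h
    have hv1 : v ≠ 1 := fun e => h (e ▸ List.mem_cons_self)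
    have ht1 : 1 ∉ t := fun m => h (List.mem_cons_of_mem _ m)
    by_cases hv2 : v = 2 <;>
      simp [PySem.List.enumerate_cons, bLoop, hv1, hv2, lastTwo, ih _ _ ht1]

lemma bLoop_rsome (q : List Int) (s p1 : Int) (l : Option Int) (r0 : Int) :
    bLoop (some p1) l (some r0) (PySem.List.enumerate q s) = (some p1, l, some r0) := by
  induction q generalizing s with
  | nil => simp [PySem.List.enumerate_nil, bLoop]
  | cons v t ih =>
    by_cases hv2 : v = 2 <;> simp [PySem.List.enumerate_cons, bLoop, hv2, ih]

lemma bLoop_rnone (q : List Int) (s p1 : Int) (l : Option Int) :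
    bLoop (some p1) l none (PySem.List.enumerate q s) = (some p1, l, firstTwo q s) := by
  induction q generalizing s with
  | nil => simp [PySem.List.enumerate_nil, bLoop, firstTwo]
  | cons v t ih =>
    by_cases hv2 : v = 2
    · simp [PySem.List.enumerate_cons, bLoop, hv2, firstTwo, bLoop_rsome]
    · simp [PySem.List.enumerate_cons, bLoop, hv2, firstTwo, ih]

lemma bLoop_no2 (q : List Int) (s : Int) (p1 l r : Option Int) :
    2 ∉ q → ∃ p1', bLoop p1 l r (PySem.List.enumerate q s) = (p1', l, r) := by
  induction q generalizing s p1 with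
  | nil => intro _; exact ⟨p1, by simp [PySem.List.enumerate_nil, bLoop]⟩
  | cons v t ih =>
    intro h
    have hv2 : v ≠ 2 := fun e => h (e ▸ List.mem_cons_self)
    have ht : 2 ∉ t := fun m => h (List.mem_cons_of_mem _ m)
    by_cases hb : (v == 1 && p1.isNone) = true
    · obtain ⟨p1', hp⟩ := ih (s + 1) (some s) ht
      exact ⟨p1', by simp only [PySem.List.enumerate_cons, bLoop, hb, if_true]; exact hp⟩
    · obtain ⟨p1', hp⟩ := ih (s + 1) p1 ht
      refine ⟨p1', ?_⟩
      simp only [PySem.List.enumerate_cons, bLoop]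
      rw [if_neg (by simpa using hb), if_neg (by simp [hv2])]
      exact hp

lemma getD_append_cons (t : List Int) (v : Int) (rest : List Int) :
    (t ++ v :: rest).getD t.length 0 = v := by
  induction t with
  | nil => rfl
  | cons x t _ => simp

lemma aScan_eq (p1 : Int) (q rest : List Int) :
    aScan (q ++ rest) p1 (PySem.List.pyRange ((q.length : Int) - 1) (-1) (-1))
      = match lastTwo q 0 none with | some l => p1 - l | none => 0 := by
  induction q using List.reverseRecOn generalizing rest with
  | nil => simp [aScan, lastTwo]
  | append_singleton t v ih =>
    have hassoc : t ++ [v] ++ rest = t ++ (v :: rest) := by simp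
    have hlen : (((t ++ [v]).length : Int)) - 1 = (t.length : Int) := by
      push_cast [List.length_append, List.length_singleton]
      ring
    rw [hassoc, hlen, PySem.List.pyRange_neg_one_cons (by omega : (-1:Int) < (t.length : Int))]
    have hget : PySem.List.pyGetD (t ++ (v :: rest)) ((t.length : Int)) 0 = v := by
      rw [PySem.List.pyGetD_natCast]
      exact getD_append_cons t v rest
    simp only [aScan, hget]
    by_cases hv : v = 2
    · simp [hv, lastTwo_append]
    · simp [hv, lastTwo_append]
      exact ih (v :: rest)

-- ===== VERDICT (by name: the statement is the Claim_ definition above) =====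
theorem ClosestEnemy_spec : Claim_equal_ClosestEnemy := by
  intro arr _hdom hpre
  show ClosestEnemy arr = ClosestEnemy_alt arr
  by_cases h2 : 2 ∈ arr
  · have h1 : 1 ∈ arr := hpre h2
    obtain ⟨k, hk⟩ := Option.isSome_iff_exists.mp ((PySem.List.index?_isSome_iff arr 1).mpr h1)
    obtain ⟨pre, suf, harr, hklen, h1pre⟩ := (PySem.List.index?_eq_some_iff arr 1 k).mp hk
    have hstep1 : ∀ (L : Option Int) (i : Int) (rest : List (Int × Int)),
        bLoop none L none ((i, 1) :: rest) = bLoop (some i) L none rest := fun _ _ _ => rfl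
    have hB : bLoop none none none (PySem.List.enumerate arr 0)
        = (some (pre.length : Int), lastTwo pre 0 none, firstTwo suf ((pre.length : Int) + 1)) := by
      rw [harr, enumerate_append, bLoop_phase1 pre 0 none none _ h1pre]
      simp only [zero_add]
      rw [PySem.List.enumerate_cons, hstep1, bLoop_rnone]
    cases hL : lastTwo pre 0 none with
    | none =>
      have h2pre : 2 ∉ pre := by
        intro hm
        have hs := lastTwo_isSome_of_mem pre 0 none hm
        rw [hL] at hs
        simp at hs
      have h2suf : 2 ∈ suf := by
        rw [harr] at h2
        rcases List.mem_append.mp h2 with h | h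
        · exact absurd h h2pre
        · rcases List.mem_cons.mp h with h | h
          · norm_num at h
          · exact h
      obtain ⟨m, hm⟩ := Option.isSome_iff_exists.mp ((PySem.List.index?_isSome_iff suf 2).mpr h2suf)
      have hidx2 : PySem.List.index? arr 2 = some (m + 1 + pre.length) := by
        rw [harr, index?_append_not_mem 2 pre _ h2pre,
          PySem.List.index?_cons_of_ne suf (by norm_num : (1:Int) ≠ 2), hm]
        simp
      have hA : ClosestEnemy arr = ((m + 1 + pre.length : Nat) : Int) - (k : Int) := by
        unfold ClosestEnemy
        rw [if_neg (not_not_intro h2)]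
        simp only [hk, hidx2]
        rw [if_pos (show k < m + 1 + pre.length by omega)]
      have hBval : ClosestEnemy_alt arr = ((pre.length : Int) + 1 + (m : Int)) - (pre.length : Int) := by
        unfold ClosestEnemy_alt
        rw [hB, hL, firstTwo_eq, hm]
        simp
      rw [hA, hBval]
      push_cast
      omega
    | some l =>
      have h2pre : 2 ∈ pre := by
        by_contra hn
        rw [lastTwo_of_not_mem pre 0 none hn] at hL
        simp at hL
      obtain ⟨p2, hp2⟩ := Option.isSome_iff_exists.mp ((PySem.List.index?_isSome_iff pre 2).mpr h2pre)
      obtain ⟨hp2lt, -, -⟩ := PySem.List.getElem_of_index?_eq_some hp2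
      have hidx2 : PySem.List.index? arr 2 = some p2 := by
        rw [harr, PySem.List.index?_append_of_mem _ h2pre, hp2]
      have hA : ClosestEnemy arr = aScan arr (k : Int) (PySem.List.pyRange (k : Int) (-1) (-1)) := by
        unfold ClosestEnemy
        rw [if_neg (not_not_intro h2)]
        simp only [hk, hidx2]
        rw [if_neg (show ¬ (k < p2) by omega)]
      have hget1 : PySem.List.pyGetD arr (k : Int) 0 = 1 := by
        rw [PySem.List.pyGetD_natCast, harr, ← hklen]
        exact getD_append_cons pre 1 suf
      have hstep : aScan arr (k : Int) (PySem.List.pyRange (k : Int) (-1) (-1))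
          = aScan arr (k : Int) (PySem.List.pyRange ((k : Int) - 1) (-1) (-1)) := by
        rw [PySem.List.pyRange_neg_one_cons (by omega : (-1:Int) < (k : Int))]
        simp [aScan, hget1]
      have hfin : aScan arr (k : Int) (PySem.List.pyRange ((k : Int) - 1) (-1) (-1)) = (k : Int) - l := by
        have h := aScan_eq (k : Int) pre (1 :: suf)
        rw [← harr, hklen, hL] at h
        exact h
      have hBval : ClosestEnemy_alt arr = (pre.length : Int) - l := by
        unfold ClosestEnemy_alt
        rw [hB, hL]
        rfl
      rw [hA, hstep, hfin, hBval, ← hklen]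
  · obtain ⟨p1', hp⟩ := bLoop_no2 arr 0 none none none h2
    unfold ClosestEnemy ClosestEnemy_alt
    rw [if_pos h2, hp]
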